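-- pv_equiv track=rewrite | github.com/Sumitpathak721/CompetitiveCoding | leetcode/hackerrank.py | getPhoneNumber
-- ===== SOURCE A (Python) =====
-- def getPhoneNumber(s):
--     # Write your code here
--     ans = ""
--     temp = ""
--     carry  = 1;
--     for i in range(0,len(s)):
--         if(s[i]==' '):
--             if(temp=='double'):
--                 carry = 2
--                 temp = ""
--                 continue
--             elif(temp=='triple'):
--                 carry = 3
--                 temp = ""
--                 continue
--             temp = func(temp)
--             ans += temp*carry
--             temp = ""
--             carry = 1
--         else:
--             temp+=s[i]
--     if(len(temp)>0):
--         ans+=func(temp)*carry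
--     return ans
--
-- def func(temp):
--     if(temp=='zero'):
--         temp = '0'
--     elif(temp=='one'):
--         temp ='1'
--     elif(temp=='two'):
--         temp ='2'
--     elif(temp=='three'):
--         temp ='3'
--     elif(temp=='four'):
--         temp ='4'
--     elif(temp=="five"):
--         temp ='5'
--     elif(temp=='six'):
--         temp ='6'
--     elif(temp=='seven'):
--         temp ='7'
--     elif(temp=='eight'):
--         temp ='8'
--     elif(temp=='nine'):
--         temp ='9'
--     return temp
-- ===== SOURCE B (Python) =====
-- W2D = {'zero': '0', 'one': '1', 'two': '2', 'three': '3', 'four': '4',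
--        'five': '5', 'six': '6', 'seven': '7', 'eight': '8', 'nine': '9'}
--
--
-- def getPhoneNumber(s):
--     *init, last = s.split(' ')
--     ans = ""
--     carry = 1
--     for w in init:
--         if w == 'double':
--             carry = 2
--         elif w == 'triple':
--             carry = 3
--         else:
--             ans += W2D.get(w, w) * carry
--             carry = 1
--     return ans + W2D.get(last, last) * carry
-- ===== Notes on version B (the rewrite author's own statement) =====
-- stated objective: simpler
-- what changed: B replaces A's character-by-character scan with hand-built word accumulation and an if-chain word lookup by tokenizing once with str.split on a single space, a word-to-digit dict, and one fold over the tokens with the last token handled after the loop. (same O(n), but tokenization and string repetition move into C-level built-ins)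
import Mathlib
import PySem

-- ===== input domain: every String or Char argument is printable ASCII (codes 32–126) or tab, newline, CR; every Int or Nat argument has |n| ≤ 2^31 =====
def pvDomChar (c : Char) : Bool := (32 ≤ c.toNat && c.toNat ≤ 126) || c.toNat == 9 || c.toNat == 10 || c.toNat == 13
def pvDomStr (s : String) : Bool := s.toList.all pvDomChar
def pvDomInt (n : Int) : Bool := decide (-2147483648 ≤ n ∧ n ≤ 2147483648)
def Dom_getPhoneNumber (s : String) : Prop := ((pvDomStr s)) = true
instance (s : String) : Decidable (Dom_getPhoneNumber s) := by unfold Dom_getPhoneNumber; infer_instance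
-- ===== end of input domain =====

-- B tokenizes once with str.split on a single space and folds over the token list instead of scanning
-- characters and re-assembling words by hand (objective: simpler).

-- shared primitive: Python's str * int
def strMul (t : String) (n : Int) : String := String.ofList (PySem.List.pyRepeat t.toList n)

-- ===== PORT A =====
def func (t : String) : String :=
  if t = "zero" then "0"
  else if t = "one" then "1"
  else if t = "two" then "2"
  else if t = "three" then "3"
  else if t = "four" then "4"
  else if t = "five" then "5"
  else if t = "six" then "6"
  else if t = "seven" then "7"
  else if t = "eight" then "8"
  else if t = "nine" then "9"
  else t

-- the body of A's for-loop; state = (ans, temp, carry)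
def stepA (st : String × String × Int) (c : Char) : String × String × Int :=
  if c = ' ' then
    if st.2.1 = "double" then (st.1, "", 2)
    else if st.2.1 = "triple" then (st.1, "", 3)
    else (st.1 ++ strMul (func st.2.1) st.2.2, "", 1)
  else (st.1, st.2.1.push c, st.2.2)

def getPhoneNumber (s : String) : String :=
  let r := s.toList.foldl stepA ("", "", 1)
  if r.2.1.length > 0 then r.1 ++ strMul (func r.2.1) r.2.2 else r.1

-- ===== PORT B =====
def word2digit : PySem.Dict String String :=
  PySem.Dict.ofList [("zero", "0"), ("one", "1"), ("two", "2"), ("three", "3"),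
    ("four", "4"), ("five", "5"), ("six", "6"), ("seven", "7"), ("eight", "8"), ("nine", "9")]

-- the body of B's for-loop; state = (ans, carry)
def stepB (st : String × Int) (w : String) : String × Int :=
  if w = "double" then (st.1, 2)
  else if w = "triple" then (st.1, 3)
  else (st.1 ++ strMul (word2digit.getD w w) st.2, 1)

def getPhoneNumber_alt (s : String) : String :=
  let tokens := (PySem.Chars.splitOn s.toList [' ']).map String.ofList
  let initToks := tokens.dropLast          -- *init, last = tokens
  let lastTok := tokens.getLastD ""        -- the token list is never empty
  let r := initToks.foldl stepB ("", 1)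
  r.1 ++ strMul (word2digit.getD lastTok lastTok) r.2

-- ===== PRECONDITION & SPEC =====
def Spec_getPhoneNumber (s : String) (out : String) : Prop := out = getPhoneNumber_alt s
instance (s : String) (out : String) : Decidable (Spec_getPhoneNumber s out) := by unfold Spec_getPhoneNumber; infer_instance

-- ===== CLAIM (what is proved, stated in full; the proofs are below) =====
def Claim_equal_getPhoneNumber : Prop := ∀ (s : String), Dom_getPhoneNumber s → Spec_getPhoneNumber s (getPhoneNumber s)

-- ===== LEMMAS AND PROOFS =====

-- split a char list on single spaces, keeping empty pieces (proof model of the tokenizer)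
def splitSp : List Char → List (List Char)
  | [] => [[]]
  | ' ' :: r => [] :: splitSp r
  | c :: r =>
    match splitSp r with
    | [] => [[c]]          -- unreachable: splitSp is never []
    | h :: t => (c :: h) :: t

-- prepend to the first piece
def consHead (p : List Char) : List (List Char) → List (List Char)
  | [] => []
  | h :: t => (p ++ h) :: t

-- B's loop-plus-final-token, in recursive form over char-list tokens
def bLoopC : List (List Char) → String → Int → String
  | [], ans, _ => ans
  | [t], ans, carry =>
      ans ++ strMul (word2digit.getD (String.ofList t) (String.ofList t)) carry
  | t :: t' :: ts, ans, carry =>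
      if String.ofList t = "double" then bLoopC (t' :: ts) ans 2
      else if String.ofList t = "triple" then bLoopC (t' :: ts) ans 3
      else bLoopC (t' :: ts)
        (ans ++ strMul (word2digit.getD (String.ofList t) (String.ofList t)) carry) 1

theorem splitSp_cons_space (r : List Char) : splitSp (' ' :: r) = [] :: splitSp r := rfl

theorem splitSp_cons_ns (c : Char) (r : List Char) (hc : c ≠ ' ') :
    splitSp (c :: r) = match splitSp r with | [] => [[c]] | h :: t => (c :: h) :: t := by
  rw [splitSp.eq_def]
  simp [hc]

theorem splitSp_ne_nil (cs : List Char) : splitSp cs ≠ [] := by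
  induction cs with
  | nil => simp [splitSp]
  | cons c r ih =>
    by_cases hc : c = ' '
    · subst hc; simp [splitSp_cons_space]
    · rw [splitSp_cons_ns c r hc]
      rcases h : splitSp r with _ | ⟨h', t⟩ <;> simp

theorem consHead_nil (l : List (List Char)) : consHead [] l = l := by
  cases l <;> simp [consHead]

theorem getD_eq_func (t : String) : word2digit.getD t t = func t := by
  by_cases h0 : t = "zero"
  · subst h0; decide
  by_cases h1 : t = "one"
  · subst h1; decide
  by_cases h2 : t = "two"
  · subst h2; decide
  by_cases h3 : t = "three"
  · subst h3; decide
  by_cases h4 : t = "four"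
  · subst h4; decide
  by_cases h5 : t = "five"
  · subst h5; decide
  by_cases h6 : t = "six"
  · subst h6; decide
  by_cases h7 : t = "seven"
  · subst h7; decide
  by_cases h8 : t = "eight"
  · subst h8; decide
  by_cases h9 : t = "nine"
  · subst h9; decide
  have b0 : ("zero" == t) = false := by simp [Ne.symm h0]
  have b1 : ("one" == t) = false := by simp [Ne.symm h1]
  have b2 : ("two" == t) = false := by simp [Ne.symm h2]
  have b3 : ("three" == t) = false := by simp [Ne.symm h3]
  have b4 : ("four" == t) = false := by simp [Ne.symm h4]
  have b5 : ("five" == t) = false := by simp [Ne.symm h5]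
  have b6 : ("six" == t) = false := by simp [Ne.symm h6]
  have b7 : ("seven" == t) = false := by simp [Ne.symm h7]
  have b8 : ("eight" == t) = false := by simp [Ne.symm h8]
  have b9 : ("nine" == t) = false := by simp [Ne.symm h9]
  simp [word2digit, func, PySem.Dict.getD, PySem.Dict.get?, PySem.Dict.ofList,
    PySem.Dict.update, PySem.Dict.insert, PySem.Dict.empty, PySem.Dict.contains, List.find?,
    h0, h1, h2, h3, h4, h5, h6, h7, h8, h9, b0, b1, b2, b3, b4, b5, b6, b7, b8, b9]

theorem strMul_empty (n : Int) : strMul "" n = "" := by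
  simp [strMul, PySem.List.pyRepeat]

theorem splitOn_go_spec (l : List Char) : ∀ (fuel : Nat) (cur : List Char)
    (acc : List (List Char)), l.length < fuel →
    PySem.Chars.splitOn.go [' '] fuel l cur acc
      = acc.reverse ++ consHead cur.reverse (splitSp l) := by
  induction l with
  | nil =>
    intro fuel cur acc h
    obtain ⟨n, rfl⟩ : ∃ n, fuel = n + 1 := ⟨fuel - 1, by omega⟩
    rw [PySem.Chars.splitOn.go]
    simp [splitSp, consHead]
    omega
  | cons c r ih =>
    intro fuel cur acc h
    obtain ⟨n, rfl⟩ : ∃ n, fuel = n + 1 := ⟨fuel - 1, by omega⟩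
    rw [PySem.Chars.splitOn.go]
    by_cases hc : c = ' '
    · subst hc
      rw [if_pos (by simp [List.isPrefixOf] : ([' '].isPrefixOf (' ' :: r)) = true)]
      simp only [List.length_cons, List.length_nil, List.drop_succ_cons, List.drop_zero]
      rw [ih n [] (cur.reverse :: acc) (by simp at h ⊢; omega)]
      simp [splitSp_cons_space, consHead]
      rcases hs : splitSp r with _ | ⟨h', t⟩
      · exact absurd hs (splitSp_ne_nil r)
      · simp
    · have hp : ([' '].isPrefixOf (c :: r)) = false := by
        simp [List.isPrefixOf]
        exact fun hh => absurd hh.symm hc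
      simp only [hp, Bool.false_eq_true, if_false]
      rw [ih n (c :: cur) acc (by simp at h ⊢; omega)]
      rw [splitSp_cons_ns c r hc]
      rcases hs : splitSp r with _ | ⟨h', t⟩
      · exact absurd hs (splitSp_ne_nil r)
      · simp [consHead]

theorem splitOn_space (cs : List Char) :
    PySem.Chars.splitOn cs [' '] = splitSp cs := by
  rw [PySem.Chars.splitOn]
  rw [splitOn_go_spec cs (cs.length + 1) [] [] (by omega)]
  simp [consHead_nil]

theorem main_lemma (cs : List Char) : ∀ (ans temp : String) (carry : Int),
    (let r := cs.foldl stepA (ans, temp, carry)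
     if r.2.1.length > 0 then r.1 ++ strMul (func r.2.1) r.2.2 else r.1)
      = bLoopC (consHead temp.toList (splitSp cs)) ans carry := by
  induction cs with
  | nil =>
    intro ans temp carry
    simp only [List.foldl_nil, splitSp, consHead, List.append_nil]
    by_cases h : temp = ""
    · subst h
      simp [bLoopC, getD_eq_func, func, strMul_empty]
    · have hl : temp.length > 0 := by
        rw [← String.length_toList]
        simp only [gt_iff_lt, List.length_pos_iff, ne_eq, String.toList_eq_nil_iff]
        exact h
      simp [hl, bLoopC, getD_eq_func]
  | cons c r ih =>
    intro ans temp carry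
    simp only [List.foldl_cons]
    by_cases hc : c = ' '
    · subst hc
      rw [splitSp_cons_space]
      rcases hs : splitSp r with _ | ⟨h', t⟩
      · exact absurd hs (splitSp_ne_nil r)
      by_cases hd : temp = "double"
      · subst hd
        rw [show stepA (ans, "double", carry) ' ' = (ans, "", 2) from by simp [stepA]]
        rw [ih ans "" 2]
        simp [consHead, hs, bLoopC]
      by_cases ht : temp = "triple"
      · subst ht
        rw [show stepA (ans, "triple", carry) ' ' = (ans, "", 3) from by simp [stepA]]
        rw [ih ans "" 3]
        simp [consHead, hs, bLoopC]
      · rw [show stepA (ans, temp, carry) ' '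
            = (ans ++ strMul (func temp) carry, "", 1) from by simp [stepA, hd, ht]]
        rw [ih (ans ++ strMul (func temp) carry) "" 1]
        have hb : bLoopC ((temp.toList ++ []) :: h' :: t) ans carry
            = bLoopC (h' :: t) (ans ++ strMul (word2digit.getD temp temp) carry) 1 := by
          simp [bLoopC, hd, ht]
        rw [consHead, hb, getD_eq_func]
        simp [consHead_nil, hs]
    · rw [show stepA (ans, temp, carry) c = (ans, temp.push c, carry) from by simp [stepA, hc]]
      rw [ih ans (temp.push c) carry]
      rw [splitSp_cons_ns c r hc]
      rcases hs : splitSp r with _ | ⟨h', t⟩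
      · exact absurd hs (splitSp_ne_nil r)
      · simp [consHead]

theorem lastD_map (ts : List (List Char)) : ∀ (t' : List Char),
    (String.ofList t' :: List.map String.ofList ts).getLast?.getD ""
      = String.ofList (ts.getLast?.getD t') := by
  induction ts with
  | nil => intro t'; simp
  | cons a as ih => intro t'; simpa [List.getLast?_cons_cons, List.getLast?_cons] using ih a

theorem bRun_eq_bLoopC (toks : List (List Char)) : ∀ (ans : String) (carry : Int),
    toks ≠ [] →
    (let r := (toks.map String.ofList).dropLast.foldl stepB (ans, carry)
     r.1 ++ strMul (word2digit.getD ((toks.map String.ofList).getLastD "")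
        ((toks.map String.ofList).getLastD "")) r.2)
      = bLoopC toks ans carry := by
  induction toks with
  | nil => intro _ _ h; exact absurd rfl h
  | cons t rest ih =>
    intro ans carry _
    rcases rest with _ | ⟨t', ts⟩
    · simp [bLoopC]
    · have hne : (t' :: ts : List (List Char)) ≠ [] := by simp
      simp only [List.map_cons, List.dropLast_cons₂, List.foldl_cons, List.getLastD_cons]
      by_cases hd : String.ofList t = "double"
      · rw [show stepB (ans, carry) (String.ofList t) = (ans, 2) by simp [stepB, hd]]
        rw [show bLoopC (t :: t' :: ts) ans carry = bLoopC (t' :: ts) ans 2 by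
          simp [bLoopC, hd]]
        simpa [lastD_map] using ih ans 2 hne
      by_cases ht : String.ofList t = "triple"
      · rw [show stepB (ans, carry) (String.ofList t) = (ans, 3) by simp [stepB, ht]]
        rw [show bLoopC (t :: t' :: ts) ans carry = bLoopC (t' :: ts) ans 3 by
          simp [bLoopC, ht]]
        simpa [lastD_map] using ih ans 3 hne
      · rw [show stepB (ans, carry) (String.ofList t)
            = (ans ++ strMul (word2digit.getD (String.ofList t) (String.ofList t)) carry, 1) by
          simp [stepB, hd, ht]]
        rw [show bLoopC (t :: t' :: ts) ans carry = bLoopC (t' :: ts)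
            (ans ++ strMul (word2digit.getD (String.ofList t) (String.ofList t)) carry) 1 by
          simp [bLoopC, hd, ht]]
        simpa [lastD_map] using ih _ 1 hne

-- ===== VERDICT (by name: the statement is the Claim_ definition above) =====
theorem getPhoneNumber_spec : Claim_equal_getPhoneNumber := by
  intro s _
  show getPhoneNumber s = getPhoneNumber_alt s
  rw [getPhoneNumber, getPhoneNumber_alt]
  rw [splitOn_space]
  rw [bRun_eq_bLoopC (splitSp s.toList) "" 1 (splitSp_ne_nil s.toList)]
  rw [main_lemma s.toList "" "" 1]
  rw [show ("" : String).toList = [] from rfl, consHead_nil]
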